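-- pv_equiv track=rewrite | github.com/Charlyo/AMMM | BRKGA/DECODER_DUMMY.py | consecutiveRests
-- ===== SOURCE A (Python) =====
-- def consecutiveRests(sol, data):
--     """Returns the number of nurses that rest for more than 1 consecutive hour"""
--     num_nurses = 0
--     for nurse in sol:
--         first_hour = data['hours'] + 1
--         last_hour = -1
--         consec = 0
--         max_consec = 0
--         works_before = False
--         rests = 0
--         for hour, works in enumerate(nurse):
--             if works:
--                 consec += 1
--                 if not works_before:
--                     works_before = True
--
--                 if max_consec < consec:
--                     max_consec = consec
--
--                 if hour < first_hour:
--                     first_hour = hour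
--
--                 if hour > last_hour:
--                     last_hour = hour
--
--                 if works_before and rests > 1:
--                     num_nurses += 1
--
--                 rests = 0
--             else:
--                 rests += works_before * 1
--                 consec = 0
--     return num_nurses
-- ===== SOURCE B (Python) =====
-- def consecutiveRests(sol, data):
--     """Returns the number of nurses that rest for more than 1 consecutive hour"""
--     total = 0
--     for nurse in sol:
--         idx = [h for h, w in enumerate(nurse) if w]
--         for i, j in zip(idx, idx[1:]):
--             if j - i >= 3:
--                 total += 1
--     return total
-- ===== Notes on version B (the rewrite author's own statement) =====
-- stated objective: simpler
-- what changed: Replaces A's stateful scan (tracking consec/max_consec/first_hour/last_hour/works_before/rests per nurse) with building each nurse's list of work-hour indices and counting adjacent index pairs whose difference is >= 3.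
import Mathlib
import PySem

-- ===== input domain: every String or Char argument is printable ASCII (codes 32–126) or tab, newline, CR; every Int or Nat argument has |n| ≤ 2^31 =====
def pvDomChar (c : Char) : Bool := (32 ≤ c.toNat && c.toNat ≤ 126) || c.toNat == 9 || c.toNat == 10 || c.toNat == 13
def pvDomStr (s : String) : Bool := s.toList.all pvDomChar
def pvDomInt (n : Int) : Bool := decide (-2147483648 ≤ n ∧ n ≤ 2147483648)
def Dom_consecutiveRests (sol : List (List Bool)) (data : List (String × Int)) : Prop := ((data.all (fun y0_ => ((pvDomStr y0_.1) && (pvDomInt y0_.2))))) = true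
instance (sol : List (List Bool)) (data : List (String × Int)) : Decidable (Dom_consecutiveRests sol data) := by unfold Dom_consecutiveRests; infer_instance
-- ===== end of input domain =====

-- B replaces A's stateful rest-counter scan by building each nurse's list of work
-- indices and counting adjacent index pairs with gap ≥ 3 (objective: simpler).

-- ===== PORT A =====
-- inner loop of A over one nurse; state carried exactly as A's local variables
def consecutiveRestsInner (nurse : List Bool) (hour first_hour last_hour consec max_consec : Int)
    (works_before : Bool) (rests num : Int) : Int :=
  match nurse with
  | [] => num
  | works :: tl =>
    if works then
      let consec := consec + 1
      let works_before := if ¬ works_before then true else works_before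
      let max_consec := if max_consec < consec then consec else max_consec
      let first_hour := if hour < first_hour then hour else first_hour
      let last_hour := if hour > last_hour then hour else last_hour
      let num := if works_before = true ∧ rests > 1 then num + 1 else num
      consecutiveRestsInner tl (hour + 1) first_hour last_hour consec max_consec works_before 0 num
    else
      consecutiveRestsInner tl (hour + 1) first_hour last_hour 0 max_consec works_before
        (rests + (if works_before then 1 else 0)) num

def consecutiveRests (sol : List (List Bool)) (data : List (String × Int)) : Int :=
  sol.foldl (fun num nurse =>
    -- data['hours']: first-match lookup; the KeyError case (key absent, sol ≠ []) is excluded by Pre_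
    let hours := ((data.find? (fun kv => kv.1 == "hours")).map (·.2)).getD 0
    consecutiveRestsInner nurse 0 (hours + 1) (-1) 0 0 false 0 num) 0

-- ===== PORT B =====
def consecutiveRests_alt (sol : List (List Bool)) (data : List (String × Int)) : Int :=
  sol.foldl (fun total nurse =>
    let idx := (PySem.List.enumerate nurse 0).filterMap (fun hw => if hw.2 then some hw.1 else none)
    ((idx.zip (idx.drop 1)).foldl (fun t p => if p.2 - p.1 ≥ 3 then t + 1 else t) total)) 0

-- ===== PRECONDITION & SPEC =====
-- Pre_ excludes only the inputs where A raises KeyError: a non-empty sol with no 'hours' key in data.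
def Pre_consecutiveRests (sol : List (List Bool)) (data : List (String × Int)) : Prop :=
  sol = [] ∨ data.any (fun kv => kv.1 == "hours") = true
instance (sol : List (List Bool)) (data : List (String × Int)) : Decidable (Pre_consecutiveRests sol data) := by
  unfold Pre_consecutiveRests; infer_instance
def pvWitness_consecutiveRests : List (List Bool) × (List (String × Int)) :=
  ([[true, false, false, true], [true, true]], [("hours", 4)])

def Spec_consecutiveRests (sol : List (List Bool)) (data : List (String × Int)) (out : Int) : Prop :=
  out = consecutiveRests_alt sol data
instance (sol : List (List Bool)) (data : List (String × Int)) (out : Int) : Decidable (Spec_consecutiveRests sol data out) := by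
  unfold Spec_consecutiveRests; infer_instance

-- ===== CLAIM (what is proved, stated in full; the proofs are below) =====
def Claim_equal_consecutiveRests : Prop := ∀ (sol : List (List Bool)) (data : List (String × Int)), Dom_consecutiveRests sol data → Pre_consecutiveRests sol data → Spec_consecutiveRests sol data (consecutiveRests sol data)

-- ===== LEMMAS AND PROOFS =====

-- work-hour indices of a nurse, scanning from absolute position p
def idxFrom (p : Int) : List Bool → List Int
  | [] => []
  | w :: tl => if w then p :: idxFrom (p + 1) tl else idxFrom (p + 1) tl

-- number of adjacent pairs with gap ≥ 3
def gaps : List Int → Int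
  | a :: b :: tl => (if b - a ≥ 3 then 1 else 0) + gaps (b :: tl)
  | _ => 0

theorem filterMap_enumerate_eq_idxFrom (nurse : List Bool) (s : Int) :
    (PySem.List.enumerate nurse s).filterMap (fun hw => if hw.2 then some hw.1 else none)
      = idxFrom s nurse := by
  induction nurse generalizing s with
  | nil => simp [PySem.List.enumerate_nil, idxFrom]
  | cons w tl ih =>
    rw [PySem.List.enumerate_cons]
    cases w <;> simp [List.filterMap_cons, idxFrom, ih]

theorem zip_foldl_eq_gaps (idx : List Int) (t : Int) :
    (idx.zip (idx.drop 1)).foldl (fun t p => if p.2 - p.1 ≥ 3 then t + 1 else t) t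
      = t + gaps idx := by
  induction idx generalizing t with
  | nil => simp [gaps]
  | cons a tl ih =>
    cases tl with
    | nil => simp [gaps]
    | cons b tl2 =>
      simp only [List.drop_succ_cons, List.drop_zero, List.zip_cons_cons, List.foldl_cons]
      rw [show (b :: tl2).drop 1 = tl2 by rfl] at ih
      rw [ih]
      simp only [gaps]
      split_ifs <;> omega

theorem gaps_single (v : Int) : gaps [v] = 0 := rfl

theorem inner_eq_gaps (nurse : List Bool) (hour fh lh c mc : Int) (wb : Bool) (rests num : Int)
    (hwr : wb = false → rests = 0) :
    consecutiveRestsInner nurse hour fh lh c mc wb rests num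
      = num + gaps ((if wb then [hour - 1 - rests] else []) ++ idxFrom hour nurse) := by
  induction nurse generalizing hour fh lh c mc wb rests num with
  | nil =>
    cases wb <;> simp [consecutiveRestsInner, idxFrom, gaps, gaps_single]
  | cons w tl ih =>
    cases w with
    | true =>
      simp only [consecutiveRestsInner, if_pos]
      rw [ih _ _ _ _ _ _ _ _ (by intro h; cases wb <;> simp_all)]
      cases wb with
      | false =>
        have h0 : rests = 0 := hwr rfl
        subst h0
        simp [idxFrom, gaps]
      | true =>
        simp only [idxFrom, List.cons_append, List.nil_append]
        norm_num
        rw [show gaps ((hour - 1 - rests) :: hour :: idxFrom (hour + 1) tl)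
              = (if hour - (hour - 1 - rests) ≥ 3 then 1 else 0) + gaps (hour :: idxFrom (hour + 1) tl) from rfl]
        split_ifs <;> omega
    | false =>
      simp only [consecutiveRestsInner]
      rw [if_neg (by simp)]
      rw [ih _ _ _ _ _ _ _ _ (by intro h; subst h; simp [hwr rfl])]
      cases wb with
      | false => simp [idxFrom]
      | true =>
        simp only [idxFrom, Bool.false_eq_true, if_false, if_true]
        congr 3
        ring

theorem per_nurse (nurse : List Bool) (fh num : Int) :
    consecutiveRestsInner nurse 0 fh (-1) 0 0 false 0 num = num + gaps (idxFrom 0 nurse) := by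
  rw [inner_eq_gaps _ _ _ _ _ _ _ _ _ (fun _ => rfl)]
  simp

theorem folds_agree (sol : List (List Bool)) (data : List (String × Int)) (acc : Int) :
    sol.foldl (fun num nurse =>
      let hours := ((data.find? (fun kv => kv.1 == "hours")).map (·.2)).getD 0
      consecutiveRestsInner nurse 0 (hours + 1) (-1) 0 0 false 0 num) acc
    = sol.foldl (fun total nurse =>
      let idx := (PySem.List.enumerate nurse 0).filterMap (fun hw => if hw.2 then some hw.1 else none)
      ((idx.zip (idx.drop 1)).foldl (fun t p => if p.2 - p.1 ≥ 3 then t + 1 else t) total)) acc := by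
  induction sol generalizing acc with
  | nil => rfl
  | cons nurse tl ih =>
    simp only [List.foldl_cons]
    rw [ih]
    congr 1
    rw [per_nurse, filterMap_enumerate_eq_idxFrom, zip_foldl_eq_gaps]

-- ===== VERDICT (by name: the statement is the Claim_ definition above) =====
theorem consecutiveRests_spec : Claim_equal_consecutiveRests := by
  intro sol data _ _
  unfold Spec_consecutiveRests consecutiveRests consecutiveRests_alt
  exact folds_agree sol data 0
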